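-- pv_equiv track=rewrite | github.com/tedhen/AoC2024 | Day4/day4.py | mas_generator
-- ===== SOURCE A (Python) =====
-- def is_valid_coord(y:int,x:int, y_size:int, x_size:int)->bool:
--     """Check if a coord is inside a matrix"""
--     return not ( x < 0 or y < 0 or x >= x_size or y >= y_size)
--
-- def mas_generator(y,x, y_size, x_size):
--     step = 3
--     coords = []
--     first_diagonal = [((y-1) + offs, (x-1) + offs) for offs in range(step)]
--     if all([is_valid_coord(*pos, y_size, x_size) for pos in first_diagonal]):
--         coords.append(first_diagonal)
--     second_diagonal = [((y-1) + offs, (x+1) - offs) for offs in range(step)]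
--     if all([is_valid_coord(*pos, y_size, x_size) for pos in second_diagonal]):
--         coords.append(second_diagonal)
--
--     if len(coords) == 2:
--         return coords
--
--     return []
-- ===== SOURCE B (Python) =====
-- def mas_generator(y, x, y_size, x_size):
--     # Single fused recursive pass: walk offsets 2..0, validating and building
--     # BOTH diagonals back-to-front simultaneously, aborting on the first
--     # out-of-bounds cell. (Each diagonal's cells share the same y's and the
--     # same set of x's, so one fused validity scan decides both.)
--     def go(offs, d1, d2):
--         if offs < 0:
--             return [d1, d2]
--         p1 = (y - 1 + offs, x - 1 + offs)
--         p2 = (y - 1 + offs, x + 1 - offs)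
--         for (py, px) in (p1, p2):
--             if py < 0 or py >= y_size or px < 0 or px >= x_size:
--                 return []
--         return go(offs - 1, [p1] + d1, [p2] + d2)
--     return go(2, [], [])
-- ===== Notes on version B (the rewrite author's own statement) =====
-- stated objective: alternative
-- what changed: Replaced A's staged passes (build each diagonal by comprehension, validate each with a separate all(is_valid_coord...) scan, then count) by one fused recursive pass over the offsets that validates and constructs both diagonals back-to-front simultaneously and aborts early on the first out-of-bounds cell; correctness of the fusion rests on the two diagonals covering the same rows and the same set of columns, so one cell failing kills both.
import Mathlib
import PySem

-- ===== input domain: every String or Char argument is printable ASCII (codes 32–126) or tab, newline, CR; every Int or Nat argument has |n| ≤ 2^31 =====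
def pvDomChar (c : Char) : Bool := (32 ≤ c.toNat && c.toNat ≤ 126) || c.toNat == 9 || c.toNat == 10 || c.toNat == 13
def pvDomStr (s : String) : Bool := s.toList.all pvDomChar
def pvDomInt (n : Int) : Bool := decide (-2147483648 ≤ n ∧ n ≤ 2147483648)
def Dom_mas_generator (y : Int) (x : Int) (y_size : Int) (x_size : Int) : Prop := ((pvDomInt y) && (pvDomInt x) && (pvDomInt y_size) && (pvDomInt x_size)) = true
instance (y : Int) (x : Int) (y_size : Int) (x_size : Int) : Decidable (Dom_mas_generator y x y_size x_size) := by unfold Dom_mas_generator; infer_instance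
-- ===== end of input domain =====

-- B fuses A's staged diagonal-building and validity scans into one recursive
-- back-to-front pass with early abort (objective: alternative decomposition).
-- ===== PORT A =====
def is_valid_coord (y : Int) (x : Int) (y_size : Int) (x_size : Int) : Bool :=
  !(x < 0 || y < 0 || x ≥ x_size || y ≥ y_size)

def mas_generator (y : Int) (x : Int) (y_size : Int) (x_size : Int) : List (List (Int × Int)) :=
  let coords : List (List (Int × Int)) := []
  let first_diagonal := (PySem.List.pyRange 0 3 1).map (fun offs => ((y-1) + offs, (x-1) + offs))
  let coords := if (first_diagonal.map (fun pos => is_valid_coord pos.1 pos.2 y_size x_size)).all id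
                then coords ++ [first_diagonal] else coords
  let second_diagonal := (PySem.List.pyRange 0 3 1).map (fun offs => ((y-1) + offs, (x+1) - offs))
  let coords := if (second_diagonal.map (fun pos => is_valid_coord pos.1 pos.2 y_size x_size)).all id
                then coords ++ [second_diagonal] else coords
  if coords.length == 2 then coords else []

-- ===== PORT B =====
-- go offs d1 d2 of Source B; Python recurses on the Int offs down past 0, ported
-- as a Nat fuel n with offs = n - 1 (n = 0 ↔ offs < 0).
def mas_go (y : Int) (x : Int) (y_size : Int) (x_size : Int) :
    Nat → List (Int × Int) → List (Int × Int) → List (List (Int × Int))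
  | 0, d1, d2 => [d1, d2]
  | n + 1, d1, d2 =>
    let offs : Int := n
    let p1 := ((y - 1) + offs, (x - 1) + offs)
    let p2 := ((y - 1) + offs, (x + 1) - offs)
    -- the 'for (py, px) in (p1, p2)' early-return loop, unrolled over its two cells
    if p1.1 < 0 || p1.1 ≥ y_size || p1.2 < 0 || p1.2 ≥ x_size then []
    else if p2.1 < 0 || p2.1 ≥ y_size || p2.2 < 0 || p2.2 ≥ x_size then []
    else mas_go y x y_size x_size n (p1 :: d1) (p2 :: d2)

def mas_generator_alt (y : Int) (x : Int) (y_size : Int) (x_size : Int) : List (List (Int × Int)) :=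
  mas_go y x y_size x_size 3 [] []

-- ===== PRECONDITION & SPEC =====
def Spec_mas_generator (y : Int) (x : Int) (y_size : Int) (x_size : Int) (out : List (List (Int × Int))) : Prop := out = mas_generator_alt y x y_size x_size
instance (y : Int) (x : Int) (y_size : Int) (x_size : Int) (out : List (List (Int × Int))) : Decidable (Spec_mas_generator y x y_size x_size out) := by unfold Spec_mas_generator; infer_instance

-- ===== CLAIM (what is proved, stated in full; the proofs are below) =====
def Claim_equal_mas_generator : Prop := ∀ (y : Int) (x : Int) (y_size : Int) (x_size : Int), Dom_mas_generator y x y_size x_size → Spec_mas_generator y x y_size x_size (mas_generator y x y_size x_size)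

-- ===== LEMMAS AND PROOFS =====

-- ===== VERDICT (by name: the statement is the Claim_ definition above) =====
set_option maxHeartbeats 1000000 in
theorem mas_generator_spec : Claim_equal_mas_generator := by
  intro y x y_size x_size _
  unfold Spec_mas_generator mas_generator mas_generator_alt
  have hr : PySem.List.pyRange 0 3 1 = [0, 1, 2] := by
    rw [PySem.List.pyRange_one]
    simp [List.range_succ]
  simp only [hr, List.map_cons, List.map_nil, List.all_cons, List.all_nil, id,
    is_valid_coord, mas_go]
  norm_num
  split_ifs <;> first | rfl | (exfalso; omega) | simp_all
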